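-- pv_equiv track=rewrite | github.com/code-philia/Xsearch | dataloader.py | shrink_nested_spans
-- ===== SOURCE A (Python) =====
-- from typing import List, Tuple, Dict, Any, Optional
--
-- def shrink_nested_spans(spans: List[Tuple[int, int]]) -> List[Tuple[int, int]]:
--     spans = sorted(spans, key=lambda x: (x[0], -x[1]))  # sort by start asc, end desc
--     result = []
--     for i, (s1, e1) in enumerate(spans):
--         if all(
--            (s1, e1) == (s2, e2) or not (s1 <= s2 and e2 <= e1) for j, (s2, e2) in enumerate(spans) if i != j
--         ):
--             result.append((s1, e1))
--     # if nothing is nested (e.g. (1,1)), keep all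
--     if not result:
--         return spans
--     return result
-- ===== SOURCE B (Python) =====
-- from typing import List, Tuple
--
-- def shrink_nested_spans(spans: List[Tuple[int, int]]) -> List[Tuple[int, int]]:
--     # One right-to-left sweep over the sorted list: a span strictly contains another
--     # distinct span iff some later span (in (start asc, end desc) order) has a smaller
--     # end, or an equal minimal end achieved by a different (start, end) pair.
--     spans = sorted(spans, key=lambda x: (x[0], -x[1]))
--     kept = []
--     min_e = None   # minimum end among spans already swept (the suffix)
--     min_pair = None  # the unique pair achieving min_e, or None if several distinct pairs do
--     for s, e in reversed(spans):
--         contains_distinct = min_e is not None and (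
--             min_e < e or (min_e == e and min_pair != (s, e))
--         )
--         if not contains_distinct:
--             kept.append((s, e))
--         if min_e is None or e < min_e:
--             min_e, min_pair = e, (s, e)
--         elif e == min_e and min_pair != (s, e):
--             min_pair = None
--     kept.reverse()
--     if not kept:
--         return spans
--     return kept
-- ===== Notes on version B (the rewrite author's own statement) =====
-- stated objective: faster
-- what changed: A tests every span against every other span for containment; B sorts once by (start asc, end desc) and does a single right-to-left sweep tracking the minimum suffix end (and its unique achiever, to handle duplicates), so the inner scan disappears.
import Mathlib
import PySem

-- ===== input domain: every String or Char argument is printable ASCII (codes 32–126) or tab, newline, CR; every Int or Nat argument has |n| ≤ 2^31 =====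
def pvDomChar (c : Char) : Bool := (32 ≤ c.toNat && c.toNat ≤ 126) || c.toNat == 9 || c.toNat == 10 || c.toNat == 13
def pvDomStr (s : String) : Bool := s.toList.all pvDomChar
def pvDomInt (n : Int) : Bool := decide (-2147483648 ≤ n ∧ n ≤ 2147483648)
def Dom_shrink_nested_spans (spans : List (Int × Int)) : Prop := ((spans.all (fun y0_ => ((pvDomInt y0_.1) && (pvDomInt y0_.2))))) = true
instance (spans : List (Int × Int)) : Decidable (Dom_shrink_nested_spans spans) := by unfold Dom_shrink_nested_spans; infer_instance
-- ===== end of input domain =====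

-- B replaces A's quadratic all-pairs containment test by a single right-to-left sweep
-- over the sorted list that tracks the minimum end of the suffix (objective: faster).

-- ===== PORT A =====
-- Python's tuple key (x[0], -x[1]) is compared lexicographically: modelled by the Lex order on Int ×ₗ Int.
-- acondA is the generator 'all((s1,e1)==(s2,e2) or not (s1<=s2 and e2<=e1) for j,(s2,e2) in enumerate(spans) if i != j)'
def acondA (spans2 : List (Int × Int)) (ip : Int × (Int × Int)) : Bool :=
  (PySem.List.enumerate spans2).all
    (fun jq => decide (ip.1 = jq.1) || decide (ip.2 = jq.2) ||
               !(decide (ip.2.1 ≤ jq.2.1) && decide (jq.2.2 ≤ ip.2.2)))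

def shrink_nested_spans (spans : List (Int × Int)) : List (Int × Int) :=
  let spans2 := PySem.List.sorted spans (fun x => (toLex (x.1, -x.2) : Int ×ₗ Int)) false
  let result := (PySem.List.enumerate spans2).foldl
    (fun result ip => if acondA spans2 ip then result ++ [ip.2] else result) ([] : List (Int × Int))
  if result = [] then spans2 else result

-- ===== PORT B =====
-- Source B's 'contains_distinct' test: the sweep state is (kept list, min end of suffix, unique pair achieving it)
def flagB (minE : Option Int) (minPair : Option (Int × Int)) (p : Int × Int) : Bool :=
  match minE with
  | none => false
  | some m => decide (m < p.2) || (decide (m = p.2) && !(minPair == some p))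

-- one iteration of Source B's right-to-left sweep
def shrinkStepB (st : List (Int × Int) × Option Int × Option (Int × Int)) (p : Int × Int) :
    List (Int × Int) × Option Int × Option (Int × Int) :=
  let kept := if flagB st.2.1 st.2.2 p then st.1 else st.1 ++ [p]
  match st.2.1 with
  | none => (kept, some p.2, some p)
  | some m =>
    if p.2 < m then (kept, some p.2, some p)
    else if p.2 = m ∧ st.2.2 ≠ some p then (kept, some m, none)
    else (kept, some m, st.2.2)

def shrink_nested_spans_alt (spans : List (Int × Int)) : List (Int × Int) :=
  let spans2 := PySem.List.sorted spans (fun x => (toLex (x.1, -x.2) : Int ×ₗ Int)) false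
  let st := spans2.reverse.foldl shrinkStepB ([], none, none)
  let kept := st.1.reverse
  if kept = [] then spans2 else kept

-- ===== PRECONDITION & SPEC =====
def Spec_shrink_nested_spans (spans : List (Int × Int)) (out : List (Int × Int)) : Prop := out = shrink_nested_spans_alt spans
instance (spans : List (Int × Int)) (out : List (Int × Int)) : Decidable (Spec_shrink_nested_spans spans out) := by unfold Spec_shrink_nested_spans; infer_instance

-- ===== CLAIM (what is proved, stated in full; the proofs are below) =====
def Claim_equal_shrink_nested_spans : Prop := ∀ (spans : List (Int × Int)), Dom_shrink_nested_spans spans → Spec_shrink_nested_spans spans (shrink_nested_spans spans)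

-- ===== LEMMAS AND PROOFS =====

-- the order the sort establishes: start ascending, end descending on equal starts
def ordSE (p q : Int × Int) : Prop := p.1 < q.1 ∨ (p.1 = q.1 ∧ q.2 ≤ p.2)

-- the common normal form of both programs: keep p iff no later (suffix) span is distinct with end ≤ p's end
def keepList : List (Int × Int) → List (Int × Int)
  | [] => []
  | p :: T => if ∀ q ∈ T, q = p ∨ p.2 < q.2 then p :: keepList T else keepList T

-- A's inner boolean, with the index test dropped (q = p covers the skipped self-position)
def pbB (p q : Int × Int) : Bool := decide (p = q) || !(decide (p.1 ≤ q.1) && decide (q.2 ≤ p.2))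

theorem sorted_pairwise_ordSE (spans : List (Int × Int)) :
    (PySem.List.sorted spans (fun x => (toLex (x.1, -x.2) : Int ×ₗ Int)) false).Pairwise ordSE := by
  have h := PySem.List.sorted_pairwise spans (fun x => (toLex (x.1, -x.2) : Int ×ₗ Int))
  refine h.imp ?_
  intro a b hab
  rw [Prod.Lex.le_iff] at hab
  simp only [ofLex_toLex] at hab
  rcases hab with h1 | ⟨h1, h2⟩
  · exact Or.inl h1
  · exact Or.inr ⟨h1, by omega⟩

theorem acond_eq_all (L : List (Int × Int)) (ip : Int × (Int × Int))
    (hip : ip ∈ PySem.List.enumerate L 0) :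
    acondA L ip = L.all (pbB ip.2) := by
  rcases (PySem.List.mem_enumerate_iff L 0 ip).mp hip with ⟨k, hk, rfl⟩
  unfold acondA
  cases hall : L.all (pbB (L[k])) with
  | true =>
    simp only [List.all_eq_true] at hall ⊢
    intro jq hjq
    rcases (PySem.List.mem_enumerate_iff L 0 jq).mp hjq with ⟨j, hj, rfl⟩
    have := hall (L[j]) (List.getElem_mem hj)
    simp only [pbB] at this
    simp only [Bool.or_assoc]
    rcases Bool.or_eq_true_iff.mp this with h | h
    · exact Bool.or_eq_true_iff.mpr (Or.inr (Bool.or_eq_true_iff.mpr (Or.inl h)))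
    · exact Bool.or_eq_true_iff.mpr (Or.inr (Bool.or_eq_true_iff.mpr (Or.inr h)))
  | false =>
    simp only [List.all_eq_false] at hall
    rcases hall with ⟨q, hq, hqf⟩
    have hqf' : pbB (L[k]) q = false := by
      cases h : pbB (L[k]) q
      · rfl
      · exact absurd h hqf
    rcases List.mem_iff_getElem.mp hq with ⟨j, hj, rfl⟩
    simp only [pbB, Bool.or_eq_false_iff, decide_eq_false_iff_not] at hqf'
    obtain ⟨hne1, hb⟩ := hqf'
    have hkj : k ≠ j := by
      rintro rfl
      exact hne1 rfl
    apply List.all_eq_false.mpr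
    refine ⟨(0 + (j : Int), L[j]), (PySem.List.mem_enumerate_iff L 0 _).mpr ⟨j, hj, rfl⟩, ?_⟩
    simp only [Bool.or_eq_true, decide_eq_true_eq]
    intro hcontra
    rcases hcontra with (h | h) | h
    · omega
    · exact hne1 h
    · rw [hb] at h
      simp at h

theorem filter_all_eq_keepList (L : List (Int × Int)) (hPW : L.Pairwise ordSE) :
    L.filter (fun p => L.all (pbB p)) = keepList L := by
  induction L with
  | nil => simp [keepList]
  | cons p T ih =>
    have hPWT : T.Pairwise ordSE := hPW.tail
    have hord : ∀ q ∈ T, ordSE p q := fun q hq => (List.pairwise_cons.mp hPW).1 q hq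
    have hple : ∀ q ∈ T, p.1 ≤ q.1 := by
      intro q hq
      rcases hord q hq with h | ⟨h, -⟩
      · omega
      · omega
    -- the head's own test reduces to the keepList condition
    have hhead : ((p :: T).all (pbB p) = true) ↔ (∀ q ∈ T, q = p ∨ p.2 < q.2) := by
      simp only [List.all_cons, Bool.and_eq_true, List.all_eq_true]
      constructor
      · rintro ⟨-, h⟩ q hq
        have hb := h q hq
        by_cases he : q = p
        · exact Or.inl he
        · right
          simp only [pbB, Bool.or_eq_true, decide_eq_true_eq, Bool.not_eq_true',
            Bool.and_eq_false_iff, decide_eq_false_iff_not] at hb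
          rcases hb with hb | hb | hb
          · exact absurd hb.symm he
          · exact absurd (hple q hq) hb
          · omega
      · intro h
        refine ⟨by simp [pbB], fun q hq => ?_⟩
        rcases h q hq with h1 | h1
        · simp [pbB, h1.symm]
        · simp only [pbB, Bool.or_eq_true, decide_eq_true_eq, Bool.not_eq_true',
            Bool.and_eq_false_iff, decide_eq_false_iff_not]
          right; right; omega
    -- tail elements pass the head's test automatically (sortedness)
    have htail : ∀ r ∈ T, ((p :: T).all (pbB r)) = (T.all (pbB r)) := by
      intro r hr
      have ho := hord r hr
      have hpr : pbB r p = true := by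
        simp only [pbB, Bool.or_eq_true, decide_eq_true_eq, Bool.not_eq_true',
          Bool.and_eq_false_iff, decide_eq_false_iff_not]
        rcases ho with ho | ho
        · exact Or.inr (Or.inl (by omega))
        · by_cases hpe : p.2 ≤ r.2
          · exact Or.inl (Prod.ext_iff.mpr ⟨ho.1.symm, by omega⟩)
          · exact Or.inr (Or.inr (by omega))
      simp [List.all_cons, hpr]
    rw [List.filter_cons]
    by_cases hk : ∀ q ∈ T, q = p ∨ p.2 < q.2
    · rw [hhead.mpr hk, if_pos rfl, List.filter_congr htail, ih hPWT]
      simp only [keepList, if_pos hk]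
    · have hc : (p :: T).all (pbB p) = false := by
        cases h : (p :: T).all (pbB p)
        · rfl
        · exact absurd (hhead.mp h) hk
      rw [hc, if_neg Bool.false_ne_true, List.filter_congr htail, ih hPWT]
      simp only [keepList, if_neg hk]

-- A's result on the sorted list is keepList
theorem a_eq_keepList (L : List (Int × Int)) (hPW : L.Pairwise ordSE) :
    (PySem.List.enumerate L).foldl
      (fun result ip => if acondA L ip then result ++ [ip.2] else result)
      ([] : List (Int × Int)) = keepList L := by
  rw [PySem.List.foldl_append_if (p := acondA L) (f := fun ip => ip.2)]
  rw [List.filter_congr (fun ip hip => acond_eq_all L ip hip)]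
  have := List.filter_map (f := fun ip : Int × (Int × Int) => ip.2)
    (p := fun p => L.all (pbB p)) (l := PySem.List.enumerate L 0)
  simp only [Function.comp_def] at this
  rw [List.nil_append, ← this, PySem.List.map_snd_enumerate]
  exact filter_all_eq_keepList L hPW

-- the sweep-state invariant of B: minE is the minimum end of the suffix T,
-- minPair its unique achiever (none when several distinct pairs achieve it)
def MinSpec (T : List (Int × Int)) (minE : Option Int) (minPair : Option (Int × Int)) : Prop :=
  (minE = none ↔ T = []) ∧
  (∀ m, minE = some m →
    ((∃ q ∈ T, q.2 = m) ∧ (∀ q ∈ T, m ≤ q.2) ∧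
     (∀ q, minPair = some q → q ∈ T ∧ q.2 = m ∧ ∀ r ∈ T, r.2 = m → r = q) ∧
     (minPair = none → ∃ r1 ∈ T, ∃ r2 ∈ T, r1.2 = m ∧ r2.2 = m ∧ r1 ≠ r2)))

theorem flag_iff (T : List (Int × Int)) (minE : Option Int) (minPair : Option (Int × Int))
    (p : Int × Int) (h : MinSpec T minE minPair) :
    flagB minE minPair p = true ↔ ∃ q ∈ T, q ≠ p ∧ q.2 ≤ p.2 := by
  obtain ⟨hnone, hsome⟩ := h
  cases minE with
  | none => simp [flagB, hnone.mp rfl]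
  | some m =>
    obtain ⟨⟨w, hwT, hwm⟩, hmin, hpair, hnonep⟩ := hsome m rfl
    simp only [flagB, Bool.or_eq_true, Bool.and_eq_true, decide_eq_true_eq, Bool.not_eq_true']
    constructor
    · rintro (hlt | ⟨heq, hne⟩)
      · exact ⟨w, hwT, fun hwp => by subst hwp; omega, by omega⟩
      · subst heq
        cases hmp : minPair with
        | none =>
          rcases hnonep hmp with ⟨r1, hr1, r2, hr2, hm1, hm2, hrne⟩
          by_cases h1 : r1 = p
          · refine ⟨r2, hr2, ?_, by omega⟩
            rintro rfl
            exact hrne (h1.trans rfl)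
          · exact ⟨r1, hr1, h1, by omega⟩
        | some q =>
          rcases hpair q hmp with ⟨hqT, hqm, -⟩
          refine ⟨q, hqT, ?_, by omega⟩
          rintro rfl
          rw [hmp] at hne
          simp at hne
    · rintro ⟨q, hqT, hqp, hqle⟩
      have hmq := hmin q hqT
      by_cases hlt : m < p.2
      · exact Or.inl hlt
      · right
        have hm : m = p.2 := by omega
        refine ⟨hm, ?_⟩
        cases hmp : minPair with
        | none => simp
        | some u =>
          rcases hpair u hmp with ⟨huT, hum, huniq⟩
          have hqu : q = u := huniq q hqT (by omega)
          subst hqu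
          simpa using hqp

theorem b_foldr_spec (T : List (Int × Int)) :
    (T.foldr (fun x y => shrinkStepB y x) ([], none, none)).1 = (keepList T).reverse ∧
    MinSpec T (T.foldr (fun x y => shrinkStepB y x) ([], none, none)).2.1
              (T.foldr (fun x y => shrinkStepB y x) ([], none, none)).2.2 := by
  induction T with
  | nil =>
    refine ⟨rfl, ?_⟩
    constructor
    · simp
    · intro m hm; simp at hm
  | cons p T ih =>
    obtain ⟨hres, hspec⟩ := ih
    set st := T.foldr (fun x y => shrinkStepB y x) ([], none, none) with hst
    have hflag := flag_iff T st.2.1 st.2.2 p hspec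
    have hkept : (shrinkStepB st p).1 = if flagB st.2.1 st.2.2 p then st.1 else st.1 ++ [p] := by
      unfold shrinkStepB
      cases st.2.1 with
      | none => rfl
      | some m =>
        dsimp only
        split_ifs <;> rfl
    have h2nd : (shrinkStepB st p).2 = (match st.2.1 with
        | none => (some p.2, some p)
        | some m =>
          if p.2 < m then (some p.2, some p)
          else if p.2 = m ∧ st.2.2 ≠ some p then (some m, none)
          else (some m, st.2.2)) := by
      unfold shrinkStepB
      cases st.2.1 with
      | none => rfl
      | some m =>
        dsimp only
        split_ifs <;> rfl
    simp only [List.foldr_cons, ← hst]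
    constructor
    · -- kept component
      rw [hkept]
      by_cases hc : ∀ q ∈ T, q = p ∨ p.2 < q.2
      · have hfl : flagB st.2.1 st.2.2 p = false := by
          rw [Bool.eq_false_iff]
          intro hb
          rcases hflag.mp hb with ⟨q, hqT, hqp, hqle⟩
          rcases hc q hqT with h | h
          · exact hqp h
          · omega
        rw [hfl]
        simp [keepList, if_pos hc, hres]
      · have hfl : flagB st.2.1 st.2.2 p = true := by
          apply hflag.mpr
          rcases not_forall.mp hc with ⟨q, hq⟩
          rcases Classical.not_imp.mp hq with ⟨hqT, hq2⟩
          rcases not_or.mp hq2 with ⟨hq3, hq4⟩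
          exact ⟨q, hqT, hq3, by omega⟩
        rw [hfl]
        simp [keepList, if_neg hc, hres]
    · -- MinSpec component
      obtain ⟨hnone, hsome⟩ := hspec
      rw [show (shrinkStepB st p).2.1 = ((shrinkStepB st p).2).1 from rfl,
          show (shrinkStepB st p).2.2 = ((shrinkStepB st p).2).2 from rfl, h2nd]
      cases hm : st.2.1 with
      | none =>
        have hT : T = [] := hnone.mp hm
        subst hT
        constructor
        · simp
        · intro m' hm'
          obtain rfl : p.2 = m' := by simpa using hm'
          refine ⟨⟨p, by simp⟩, by simp, ?_, by simp⟩
          intro q hq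
          obtain rfl : p = q := by simpa using hq
          exact ⟨by simp, rfl, by rintro r hr -; simpa using hr⟩
      | some m =>
        obtain ⟨⟨w, hwT, hwm⟩, hmin, hpair, hnonep⟩ := hsome m hm
        by_cases h1 : p.2 < m
        · simp only [if_pos h1]
          constructor
          · simp
          · intro m' hm'
            obtain rfl : p.2 = m' := by simpa using hm'
            refine ⟨⟨p, by simp⟩, ?_, ?_, by simp⟩
            · intro q hq
              rcases List.mem_cons.mp hq with rfl | hq
              · exact le_refl _
              · have := hmin q hq
                omega
            · intro q hq
              obtain rfl : p = q := by simpa using hq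
              refine ⟨by simp, rfl, ?_⟩
              intro r hr h
              rcases List.mem_cons.mp hr with rfl | hr
              · rfl
              · have := hmin r hr
                omega
        · simp only [if_neg h1]
          by_cases h2 : p.2 = m ∧ st.2.2 ≠ some p
          · simp only [if_pos h2]
            constructor
            · simp
            · intro m' hm'
              obtain rfl : m = m' := by simpa using hm'
              refine ⟨⟨w, by simp [hwT], hwm⟩, ?_, by simp, ?_⟩
              · intro q hq
                rcases List.mem_cons.mp hq with rfl | hq
                · omega
                · exact hmin q hq
              · rintro -
                cases hmp : st.2.2 with
                | none =>
                  rcases hnonep hmp with ⟨r1, hr1, r2, hr2, ha, hb, hne⟩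
                  exact ⟨r1, by simp [hr1], r2, by simp [hr2], ha, hb, hne⟩
                | some u =>
                  rcases hpair u hmp with ⟨huT, hum, -⟩
                  refine ⟨p, by simp, u, by simp [huT], h2.1, hum, ?_⟩
                  rintro rfl
                  exact h2.2 (by rw [hmp])
          · simp only [if_neg h2]
            constructor
            · simp
            · intro m' hm'
              obtain rfl : m = m' := by simpa using hm'
              have hp2 : m ≤ p.2 := by omega
              refine ⟨⟨w, by simp [hwT], hwm⟩, ?_, ?_, ?_⟩
              · intro q hq
                rcases List.mem_cons.mp hq with rfl | hq
                · exact hp2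
                · exact hmin q hq
              · intro q hq
                rcases hpair q hq with ⟨hqT, hqm, huniq⟩
                refine ⟨by simp [hqT], hqm, ?_⟩
                intro r hr hrm
                rcases List.mem_cons.mp hr with rfl | hr
                · -- r = p with p.2 = m: ¬(p.2 = m ∧ st.2.2 ≠ some p) forces st.2.2 = some p, so q = p
                  have hsp : st.2.2 = some r := by
                    by_contra hne
                    exact h2 ⟨hrm, hne⟩
                  rw [hsp] at hq
                  exact Option.some.inj hq
                · exact huniq r hr hrm
              · intro hq
                rcases hnonep hq with ⟨r1, hr1, r2, hr2, ha, hb, hne⟩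
                exact ⟨r1, by simp [hr1], r2, by simp [hr2], ha, hb, hne⟩

-- B's kept list on the sorted list is keepList
theorem b_eq_keepList (L : List (Int × Int)) :
    (L.reverse.foldl shrinkStepB ([], none, none)).1.reverse = keepList L := by
  rw [List.foldl_reverse, (b_foldr_spec L).1]
  exact List.reverse_reverse _

-- ===== VERDICT (by name: the statement is the Claim_ definition above) =====
theorem shrink_nested_spans_spec : Claim_equal_shrink_nested_spans := by
  intro spans _
  unfold Spec_shrink_nested_spans shrink_nested_spans shrink_nested_spans_alt
  dsimp only
  rw [a_eq_keepList _ (sorted_pairwise_ordSE spans), b_eq_keepList]
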